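-- pv_equiv track=rewrite | github.com/Rajashekarreddy111/Time_Table_ | backend/services/timetable_generator.py | _split_faculty_tokens
-- ===== SOURCE A (Python) =====
-- def _normalize_id_token(value: str | int | float | None) -> str:
--     token = str(value or "").strip()
--     if token.lower() == "nan":
--         return ""
--     if token.endswith(".0"):
--         token = token[:-2]
--     return token
--
-- def _split_faculty_tokens(raw_faculty_id: str) -> tuple[str, ...]:
--     tokens = [str(raw_faculty_id or "").strip()]
--     for delimiter in [",", "/", "|", "+", "&"]:
--         next_tokens: list[str] = []
--         for token in tokens:
--             next_tokens.extend(part.strip() for part in token.split(delimiter))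
--         tokens = next_tokens
--     cleaned: list[str] = []
--     seen: set[str] = set()
--     for token in tokens:
--         normalized = _normalize_id_token(token)
--         if not normalized or normalized in seen:
--             continue
--         seen.add(normalized)
--         cleaned.append(normalized)
--     return tuple(cleaned)
-- ===== SOURCE B (Python) =====
-- # One-pass tokenizer: scan the characters once, cutting at any delimiter,
-- # instead of A's five sequential split passes; same normalize + ordered dedup.
--
-- _DELIMS = {",", "/", "|", "+", "&"}
--
-- def _normalize_id_token(value):
--     token = str(value or "").strip()
--     if token.lower() == "nan":
--         return ""
--     if token.endswith(".0"):
--         token = token[:-2]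
--     return token
--
-- def _split_faculty_tokens(raw_faculty_id):
--     text = str(raw_faculty_id or "")
--     parts = []
--     cur = []
--     for ch in text:
--         if ch in _DELIMS:
--             parts.append("".join(cur))
--             cur = []
--         else:
--             cur.append(ch)
--     parts.append("".join(cur))
--     cleaned = []
--     seen = set()
--     for part in parts:
--         normalized = _normalize_id_token(part)
--         if not normalized or normalized in seen:
--             continue
--         seen.add(normalized)
--         cleaned.append(normalized)
--     return tuple(cleaned)
-- ===== Notes on version B (the rewrite author's own statement) =====
-- stated objective: alternative
-- what changed: Replaces the five sequential delimiter-split passes (each re-stripping every token) with a single character scan that cuts at any of the five delimiters, leaving all stripping to the shared normalize step.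
import Mathlib
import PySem

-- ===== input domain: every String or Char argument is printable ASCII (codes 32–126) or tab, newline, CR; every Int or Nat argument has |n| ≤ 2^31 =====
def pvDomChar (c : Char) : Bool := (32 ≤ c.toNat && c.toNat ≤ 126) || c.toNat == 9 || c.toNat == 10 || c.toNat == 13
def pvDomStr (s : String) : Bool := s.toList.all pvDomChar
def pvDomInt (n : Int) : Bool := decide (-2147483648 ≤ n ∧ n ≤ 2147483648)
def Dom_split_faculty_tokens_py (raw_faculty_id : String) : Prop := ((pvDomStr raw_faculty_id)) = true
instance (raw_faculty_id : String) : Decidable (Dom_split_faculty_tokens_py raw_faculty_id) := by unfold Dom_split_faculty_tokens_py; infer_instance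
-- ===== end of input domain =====

-- B replaces A's five sequential delimiter-split passes with a single character scan; same normalize + ordered dedup.

-- shared helper: Python _normalize_id_token applied to a string given as List Char (both sources define it identically)
def pvNormTok (cs : List Char) : List Char :=
  let token := PySem.Chars.strip cs
  if PySem.Chars.lower token == "nan".toList then []
  else if PySem.Chars.endswith token ".0".toList then PySem.Chars.slice token none (some (-2))
  else token

-- ===== PORT A =====
def split_faculty_tokens_py (raw_faculty_id : String) : List String :=
  let tokens0 : List (List Char) := [PySem.Chars.strip raw_faculty_id.toList]
  let tokens := [',', '/', '|', '+', '&'].foldl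
    (fun tokens d =>
      tokens.foldl (fun next t =>
        next ++ (PySem.Chars.splitOn t [d]).map PySem.Chars.strip) [])
    tokens0
  let res := tokens.foldl
    (fun (st : List (List Char) × PySem.Set (List Char)) t =>
      let normalized := pvNormTok t
      if normalized.isEmpty || PySem.Set.contains st.2 normalized then st
      else (st.1 ++ [normalized], PySem.Set.add st.2 normalized))
    ([], PySem.Set.empty)
  res.1.map String.ofList

-- ===== PORT B =====
def pvDelims : List Char := [',', '/', '|', '+', '&']

def split_faculty_tokens_py_alt (raw_faculty_id : String) : List String :=
  let st := raw_faculty_id.toList.foldl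
    (fun (st : List (List Char) × List Char) ch =>
      if pvDelims.contains ch then (st.1 ++ [st.2], []) else (st.1, st.2 ++ [ch]))
    ([], [])
  let parts := st.1 ++ [st.2]
  let res := parts.foldl
    (fun (st : List (List Char) × PySem.Set (List Char)) part =>
      let normalized := pvNormTok part
      if normalized.isEmpty || PySem.Set.contains st.2 normalized then st
      else (st.1 ++ [normalized], PySem.Set.add st.2 normalized))
    ([], PySem.Set.empty)
  res.1.map String.ofList

-- ===== PRECONDITION & SPEC =====
def Spec_split_faculty_tokens_py (raw_faculty_id : String) (out : List String) : Prop := out = split_faculty_tokens_py_alt raw_faculty_id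
instance (raw_faculty_id : String) (out : List String) : Decidable (Spec_split_faculty_tokens_py raw_faculty_id out) := by unfold Spec_split_faculty_tokens_py; infer_instance

-- ===== CLAIM (what is proved, stated in full; the proofs are below) =====
def Claim_equal_split_faculty_tokens_py : Prop := ∀ (raw_faculty_id : String), Dom_split_faculty_tokens_py raw_faculty_id → Spec_split_faculty_tokens_py raw_faculty_id (split_faculty_tokens_py raw_faculty_id)

-- ===== LEMMAS AND PROOFS =====

-- proof-side model of both tokenizers: split at the characters satisfying p
def pvConsHead (pre : List Char) : List (List Char) → List (List Char)
  | [] => [pre]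
  | h :: t => (pre ++ h) :: t

def pvSplitP (p : Char → Bool) : List Char → List (List Char)
  | [] => [[]]
  | c :: cs => if p c then [] :: pvSplitP p cs else pvConsHead [c] (pvSplitP p cs)

theorem pvSplitP_ne_nil (p : Char → Bool) (cs : List Char) : pvSplitP p cs ≠ [] := by
  induction cs with
  | nil => simp [pvSplitP]
  | cons c cs ih =>
    simp only [pvSplitP]
    split
    · simp
    · match h : pvSplitP p cs with
      | [] => exact absurd h ih
      | x :: t => simp [pvConsHead]
theorem pvConsHead_nil (l : List (List Char)) (h : l ≠ []) : pvConsHead [] l = l := by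
  cases l with
  | nil => exact absurd rfl h
  | cons a t => simp [pvConsHead]
theorem pvConsHead_consHead (a b : List Char) (l : List (List Char)) :
    pvConsHead a (pvConsHead b l) = pvConsHead (a ++ b) l := by
  cases l <;> simp [pvConsHead]

theorem pvGo_spec (d : Char) (l : List Char) : ∀ (fuel : Nat) (cur : List Char) (acc : List (List Char)),
    l.length < fuel →
    PySem.Chars.splitOn.go [d] fuel l cur acc
      = acc.reverse ++ pvConsHead cur.reverse (pvSplitP (fun c => c == d) l) := by
  induction l with
  | nil =>
    intro fuel cur acc h
    match fuel with
    | f + 1 =>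
      rw [PySem.Chars.splitOn.go]
      case x_5 => omega
      simp [pvSplitP, pvConsHead]
  | cons c rest ih =>
    intro fuel cur acc h
    match fuel with
    | f + 1 =>
      rw [PySem.Chars.splitOn.go]
      by_cases hc : c = d
      · subst hc
        simp only [List.isPrefixOf, BEq.rfl, Bool.and_self, if_pos, List.length_cons, List.length_nil, List.drop_succ_cons, List.drop_zero]
        rw [ih f [] (cur.reverse :: acc) (by simpa using Nat.lt_of_succ_lt_succ h)]
        rw [List.reverse_nil, pvConsHead_nil _ (pvSplitP_ne_nil _ _)]
        simp [pvSplitP, pvConsHead]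
      · have hbeq : (d == c) = false := by simp [Ne.symm hc]
        simp only [List.isPrefixOf, hbeq, Bool.false_and, Bool.false_eq_true, if_false]
        rw [ih f (c :: cur) acc (by simpa using Nat.lt_of_succ_lt_succ h)]
        have hc2 : (c == d) = false := by simp [hc]
        simp only [pvSplitP, hc2, Bool.false_eq_true, if_false, List.reverse_cons]
        rw [pvConsHead_consHead]

theorem pvSplitOn_single (d : Char) (cs : List Char) :
    PySem.Chars.splitOn cs [d] = pvSplitP (fun c => c == d) cs := by
  have := pvGo_spec d cs (cs.length + 1) [] [] (by omega)
  simpa [PySem.Chars.splitOn, pvConsHead_nil _ (pvSplitP_ne_nil _ _)] using this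

theorem pvSplitP_merge (p q : Char → Bool) (cs : List Char) :
    (pvSplitP p cs).flatMap (pvSplitP q) = pvSplitP (fun c => p c || q c) cs := by
  induction cs with
  | nil => simp [pvSplitP]
  | cons c cs ih =>
    by_cases hp : p c
    · simp only [pvSplitP, hp, if_pos, Bool.true_or, List.flatMap_cons, ← ih]
      simp [pvSplitP]
    · match h : pvSplitP p cs with
      | [] => exact absurd h (pvSplitP_ne_nil _ _)
      | x :: t =>
        by_cases hq : q c
        · simp only [pvSplitP, hp, hq, Bool.false_eq_true, if_false, Bool.false_or, if_pos, h,
            pvConsHead, List.flatMap_cons]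
          rw [← ih, h]
          simp [pvSplitP, hq, pvConsHead]
        · simp only [pvSplitP, hp, hq, Bool.false_eq_true, if_false, Bool.false_or, h, pvConsHead,
            List.flatMap_cons]
          rw [← ih, h]
          simp only [List.flatMap_cons, pvSplitP, hq, Bool.false_eq_true, if_false]
          match h2 : pvSplitP q x with
          | [] => exact absurd h2 (pvSplitP_ne_nil _ _)
          | y :: s => simp [pvSplitP, hq, h2, pvConsHead]

theorem pvStrip_cons_space (c : Char) (h : PySem.Chars.isspace c = true) (cs : List Char) :
    PySem.Chars.strip (c :: cs) = PySem.Chars.strip cs := by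
  simp [PySem.Chars.strip, PySem.Chars.lstrip, List.dropWhile_cons_of_pos, h]

theorem pvRstrip_snoc_space (c : Char) (h : PySem.Chars.isspace c = true) (cs : List Char) :
    PySem.Chars.rstrip (cs ++ [c]) = PySem.Chars.rstrip cs := by
  simp [PySem.Chars.rstrip, List.dropWhile_cons_of_pos, h]

theorem pvStrip_snoc_space (c : Char) (h : PySem.Chars.isspace c = true) (cs : List Char) :
    PySem.Chars.strip (cs ++ [c]) = PySem.Chars.strip cs := by
  unfold PySem.Chars.strip
  by_cases hl : PySem.Chars.lstrip cs = []
  · have : PySem.Chars.lstrip (cs ++ [c]) = [] := by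
      simp only [PySem.Chars.lstrip] at hl ⊢
      rw [List.dropWhile_append, hl]
      simp [List.dropWhile_cons_of_pos, h]
    simp [this, hl]
  · have : PySem.Chars.lstrip (cs ++ [c]) = PySem.Chars.lstrip cs ++ [c] := by
      simp only [PySem.Chars.lstrip] at hl ⊢
      rw [List.dropWhile_append]
      simp [hl]
    rw [this, pvRstrip_snoc_space c h]

def pvSnocLast (c : Char) : List (List Char) → List (List Char)
  | [] => [[c]]
  | [h] => [h ++ [c]]
  | h :: t => h :: pvSnocLast c t

theorem pvSplitP_snoc (p : Char → Bool) (c : Char) (xs : List Char) :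
    pvSplitP p (xs ++ [c]) =
      if p c then pvSplitP p xs ++ [[]] else pvSnocLast c (pvSplitP p xs) := by
  induction xs with
  | nil =>
    by_cases hc : p c <;> simp [pvSplitP, pvSnocLast, pvConsHead, hc]
  | cons x xs ih =>
    by_cases hx : p x
    · simp only [List.cons_append, pvSplitP, hx, if_pos, ih]
      by_cases hc : p c
      · simp [hc]
      · simp only [hc, Bool.false_eq_true, if_false]
        match h : pvSplitP p xs with
        | [] => exact absurd h (pvSplitP_ne_nil _ _)
        | y :: t => simp [pvSnocLast]
    · simp only [List.cons_append, pvSplitP, hx, Bool.false_eq_true, if_false, ih]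
      by_cases hc : p c
      · simp only [hc, if_pos]
        match h : pvSplitP p xs with
        | [] => exact absurd h (pvSplitP_ne_nil _ _)
        | y :: t => simp [pvConsHead]
      · simp only [hc, Bool.false_eq_true, if_false]
        match h : pvSplitP p xs with
        | [] => exact absurd h (pvSplitP_ne_nil _ _)
        | y :: t =>
          match t with
          | [] => simp [pvConsHead, pvSnocLast]
          | z :: t' => simp [pvConsHead, pvSnocLast]

theorem pvSnocLast_map_strip (c : Char) (h : PySem.Chars.isspace c = true)
    (l : List (List Char)) (hl : l ≠ []) :
    (pvSnocLast c l).map PySem.Chars.strip = l.map PySem.Chars.strip := by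
  induction l with
  | nil => exact absurd rfl hl
  | cons x t ih =>
    match t with
    | [] => simp [pvSnocLast, pvStrip_snoc_space c h]
    | z :: t' => simp [pvSnocLast, ih]

theorem pvSplitP_cons_space (p : Char → Bool) (hp : ∀ c, p c = true → PySem.Chars.isspace c = false)
    (c : Char) (hc : PySem.Chars.isspace c = true) (xs : List Char) :
    (pvSplitP p (c :: xs)).map PySem.Chars.strip = (pvSplitP p xs).map PySem.Chars.strip := by
  have hpc : p c = false := by
    by_contra h
    have := hp c (by revert h; cases p c <;> simp)
    rw [this] at hc; exact absurd hc (by simp)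
  simp only [pvSplitP, hpc, Bool.false_eq_true, if_false]
  match h : pvSplitP p xs with
  | [] => exact absurd h (pvSplitP_ne_nil _ _)
  | y :: t => simp [pvConsHead, pvStrip_cons_space c hc]

theorem pvSplitP_snoc_space (p : Char → Bool) (hp : ∀ c, p c = true → PySem.Chars.isspace c = false)
    (c : Char) (hc : PySem.Chars.isspace c = true) (xs : List Char) :
    (pvSplitP p (xs ++ [c])).map PySem.Chars.strip = (pvSplitP p xs).map PySem.Chars.strip := by
  have hpc : p c = false := by
    by_contra h
    have := hp c (by revert h; cases p c <;> simp)
    rw [this] at hc; exact absurd hc (by simp)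
  rw [pvSplitP_snoc, hpc]
  simp only [Bool.false_eq_true, if_false]
  exact pvSnocLast_map_strip c hc _ (pvSplitP_ne_nil _ _)

theorem pvSplitP_ws_prefix (p : Char → Bool) (hp : ∀ c, p c = true → PySem.Chars.isspace c = false)
    (ws : List Char) (hws : ∀ c ∈ ws, PySem.Chars.isspace c = true) (xs : List Char) :
    (pvSplitP p (ws ++ xs)).map PySem.Chars.strip = (pvSplitP p xs).map PySem.Chars.strip := by
  induction ws with
  | nil => simp
  | cons w ws ih =>
    rw [List.cons_append, pvSplitP_cons_space p hp w (hws w (by simp)) (ws ++ xs)]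
    exact ih (fun c hc => hws c (by simp [hc]))

theorem pvSplitP_ws_suffix (p : Char → Bool) (hp : ∀ c, p c = true → PySem.Chars.isspace c = false)
    (ws : List Char) (hws : ∀ c ∈ ws, PySem.Chars.isspace c = true) :
    ∀ (xs : List Char),
    (pvSplitP p (xs ++ ws)).map PySem.Chars.strip = (pvSplitP p xs).map PySem.Chars.strip := by
  induction ws with
  | nil => simp
  | cons w ws ih =>
    intro xs
    have : xs ++ w :: ws = (xs ++ [w]) ++ ws := by simp
    rw [this, ih (fun c hc => hws c (by simp [hc])) (xs ++ [w]),
      pvSplitP_snoc_space p hp w (hws w (by simp)) xs]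

theorem pvSplitP_strip (p : Char → Bool) (hp : ∀ c, p c = true → PySem.Chars.isspace c = false)
    (cs : List Char) :
    (pvSplitP p (PySem.Chars.strip cs)).map PySem.Chars.strip
      = (pvSplitP p cs).map PySem.Chars.strip := by
  have hdecomp : cs = (cs.takeWhile PySem.Chars.isspace) ++ PySem.Chars.lstrip cs := by
    simp [PySem.Chars.lstrip, List.takeWhile_append_dropWhile]
  have h1 : (pvSplitP p (PySem.Chars.lstrip cs)).map PySem.Chars.strip
      = (pvSplitP p cs).map PySem.Chars.strip := by
    conv_rhs => rw [hdecomp]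
    rw [pvSplitP_ws_prefix p hp _ (fun c hc => List.mem_takeWhile_imp hc) _]
  have hdecomp2 : PySem.Chars.lstrip cs
      = PySem.Chars.strip cs ++ ((PySem.Chars.lstrip cs).reverse.takeWhile PySem.Chars.isspace).reverse := by
    simp only [PySem.Chars.strip, PySem.Chars.rstrip, ← List.reverse_append,
      List.takeWhile_append_dropWhile, List.reverse_reverse]
  rw [← h1]
  conv_rhs => rw [hdecomp2]
  rw [pvSplitP_ws_suffix p hp _ (fun c hc => List.mem_takeWhile_imp (List.mem_reverse.mp hc))]

theorem pvLstrip_idem (cs : List Char) :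
    PySem.Chars.lstrip (PySem.Chars.lstrip cs) = PySem.Chars.lstrip cs := by
  simp [PySem.Chars.lstrip, List.dropWhile_idempotent]

theorem pvRstrip_idem (cs : List Char) :
    PySem.Chars.rstrip (PySem.Chars.rstrip cs) = PySem.Chars.rstrip cs := by
  simp [PySem.Chars.rstrip, List.dropWhile_idempotent]

theorem pvLstrip_rstrip_lstrip (cs : List Char) (h : PySem.Chars.lstrip cs = cs) :
    PySem.Chars.lstrip (PySem.Chars.rstrip cs) = PySem.Chars.rstrip cs := by
  simp only [PySem.Chars.lstrip, PySem.Chars.rstrip] at *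
  match hd : (List.dropWhile PySem.Chars.isspace cs.reverse).reverse with
  | [] => simp
  | x :: t =>
    rw [List.dropWhile_cons]
    have hpre : (x :: t) <+: cs := by
      have hs := List.dropWhile_suffix (l := cs.reverse) (p := PySem.Chars.isspace)
      have := List.reverse_prefix.mpr hs
      rw [List.reverse_reverse] at this
      rwa [hd] at this
    obtain ⟨r, hr⟩ := hpre
    have hx : PySem.Chars.isspace x = false := by
      rw [← hr] at h
      rw [List.cons_append, List.dropWhile_cons] at h
      by_cases hx : PySem.Chars.isspace x
      · exfalso
        rw [if_pos hx] at h
        have := congrArg List.length h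
        have hle := List.length_dropWhile_le PySem.Chars.isspace (t ++ r)
        simp at this
        simp only [List.length_append] at hle
        omega
      · simpa using hx
    simp [hx]

theorem pvStrip_idem (cs : List Char) : PySem.Chars.strip (PySem.Chars.strip cs) = PySem.Chars.strip cs := by
  have h2 : PySem.Chars.lstrip (PySem.Chars.rstrip (PySem.Chars.lstrip cs))
      = PySem.Chars.rstrip (PySem.Chars.lstrip cs) :=
    pvLstrip_rstrip_lstrip _ (pvLstrip_idem cs)
  show PySem.Chars.rstrip (PySem.Chars.lstrip (PySem.Chars.rstrip (PySem.Chars.lstrip cs))) = _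
  rw [h2, pvRstrip_idem]; rfl

theorem pvSplitP_false (cs : List Char) : pvSplitP (fun _ => false) cs = [cs] := by
  induction cs with
  | nil => rfl
  | cons c cs ih => simp [pvSplitP, ih, pvConsHead]

theorem pvRound (p : Char → Bool) (d : Char) (hd : PySem.Chars.isspace d = false) (cs : List Char) :
    ((pvSplitP p cs).map PySem.Chars.strip).flatMap
      (fun t => (pvSplitP (fun c => c == d) t).map PySem.Chars.strip)
    = (pvSplitP (fun c => p c || c == d) cs).map PySem.Chars.strip := by
  have hq : ∀ c, (c == d) = true → PySem.Chars.isspace c = false := by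
    intro c h; rw [eq_of_beq h]; exact hd
  rw [← pvSplitP_merge p (fun c => c == d) cs, List.map_flatMap, List.flatMap_map]
  congr 1
  funext t
  exact pvSplitP_strip _ hq t


theorem pvDelims_pred :
    (fun c => ((((false || c == ',') || c == '/') || c == '|') || c == '+') || c == '&')
      = fun c => pvDelims.contains c := by
  funext c
  simp [pvDelims, Bool.or_assoc, Bool.beq_eq_decide_eq]

theorem pvA_tokens (cs : List Char) :
    ([',', '/', '|', '+', '&'].foldl
      (fun tokens d =>
        tokens.foldl (fun next t =>
          next ++ (PySem.Chars.splitOn t [d]).map PySem.Chars.strip) [])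
      [PySem.Chars.strip cs])
    = (pvSplitP (fun c => pvDelims.contains c) cs).map PySem.Chars.strip := by
  have h0 : [PySem.Chars.strip cs] = (pvSplitP (fun _ => false) cs).map PySem.Chars.strip := by
    simp [pvSplitP_false]
  simp only [List.foldl_cons, List.foldl_nil, PySem.List.foldl_append_eq_flatMap,
    List.nil_append, pvSplitOn_single, h0]
  rw [pvRound _ ',' (by decide), pvRound _ '/' (by decide), pvRound _ '|' (by decide),
      pvRound _ '+' (by decide), pvRound _ '&' (by decide), pvDelims_pred]

theorem pvB_scan (cs : List Char) : ∀ (acc : List (List Char)) (cur : List Char),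
    (cs.foldl
      (fun (st : List (List Char) × List Char) ch =>
        if pvDelims.contains ch then (st.1 ++ [st.2], []) else (st.1, st.2 ++ [ch]))
      (acc, cur)).1
    ++ [(cs.foldl
      (fun (st : List (List Char) × List Char) ch =>
        if pvDelims.contains ch then (st.1 ++ [st.2], []) else (st.1, st.2 ++ [ch]))
      (acc, cur)).2]
    = acc ++ pvConsHead cur (pvSplitP (fun c => pvDelims.contains c) cs) := by
  induction cs with
  | nil => intro acc cur; simp [pvSplitP, pvConsHead]
  | cons c cs ih =>
    intro acc cur
    by_cases hc : pvDelims.contains c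
    · simp only [List.foldl_cons, hc, if_pos, pvSplitP]
      rw [ih (acc ++ [cur]) []]
      rw [pvConsHead_nil _ (pvSplitP_ne_nil _ _)]
      simp [pvConsHead]
    · simp only [List.foldl_cons, hc, Bool.false_eq_true, if_false, pvSplitP]
      rw [ih acc (cur ++ [c]), pvConsHead_consHead]

theorem pvNormTok_strip (cs : List Char) : pvNormTok (PySem.Chars.strip cs) = pvNormTok cs := by
  simp only [pvNormTok, pvStrip_idem]

def pvDedupGo (st : List (List Char) × PySem.Set (List Char)) (n : List Char) :
    List (List Char) × PySem.Set (List Char) :=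
  if n.isEmpty || PySem.Set.contains st.2 n then st else (st.1 ++ [n], PySem.Set.add st.2 n)

-- ===== VERDICT (by name: the statement is the Claim_ definition above) =====
theorem split_faculty_tokens_py_spec : Claim_equal_split_faculty_tokens_py := by
  intro raw _
  show split_faculty_tokens_py raw = split_faculty_tokens_py_alt raw
  unfold split_faculty_tokens_py split_faculty_tokens_py_alt
  simp only []
  rw [pvA_tokens raw.toList, pvB_scan raw.toList [] [],
    pvConsHead_nil _ (pvSplitP_ne_nil _ _), List.nil_append]
  rw [show (fun (st : List (List Char) × PySem.Set (List Char)) t =>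
        let normalized := pvNormTok t
        if normalized.isEmpty || PySem.Set.contains st.2 normalized then st
        else (st.1 ++ [normalized], PySem.Set.add st.2 normalized))
      = (fun st t => pvDedupGo st (pvNormTok t)) from rfl]
  rw [← List.foldl_map (f := pvNormTok) (g := pvDedupGo), ← List.foldl_map (f := pvNormTok) (g := pvDedupGo)]
  rw [List.map_map, show pvNormTok ∘ PySem.Chars.strip = pvNormTok from funext pvNormTok_strip]
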